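-- pv_equiv track=rewrite | github.com/DaSeipel/bettingsim | scripts/cross_reference_bracket_teams.py | find_in_db
-- ===== SOURCE A (Python) =====
-- from typing import Optional
--
-- def normalize(s: str) -> str:
--     return (s or "").strip().lower()
--
-- def find_in_db(name: str, db_teams: list[str]) -> Optional[str]:
--     """Return DB team if name matches (exact, normalized, or substring); else None."""
--     if not name or not db_teams:
--         return None
--     n = normalize(name)
--     if name in db_teams:
--         return name
--     db_lower = [t.strip().lower() for t in db_teams]
--     if n in db_lower:
--         return db_teams[db_lower.index(n)]
--     for st in db_teams:
--         if n == normalize(st):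
--             return st
--         if n in st.lower() or st.lower() in n:
--             return st
--     return None
-- ===== SOURCE B (Python) =====
-- def find_in_db(name, db_teams):
--     """Return DB team if name matches (exact, normalized, or substring); else None."""
--     if not name or not db_teams:
--         return None
--     if name in db_teams:
--         return name
--     n = name.strip().lower()
--     norm_hit = None
--     sub_hit = None
--     for st in db_teams:
--         sl = st.lower()
--         if norm_hit is None and st.strip().lower() == n:
--             norm_hit = st
--         if sub_hit is None and (n in sl or sl in n):
--             sub_hit = st
--     return norm_hit if norm_hit is not None else sub_hit
-- ===== Notes on version B (the rewrite author's own statement) =====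
-- stated objective: simpler
-- what changed: Replaces A's three separate scans (exact membership, a full lowered-list build plus n-in-list plus .index, and a two-branch fallback loop) with the exact check followed by ONE loop that maintains two first-match slots (normalized-equal, substring), returning the normalized slot before the substring slot.
import Mathlib
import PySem

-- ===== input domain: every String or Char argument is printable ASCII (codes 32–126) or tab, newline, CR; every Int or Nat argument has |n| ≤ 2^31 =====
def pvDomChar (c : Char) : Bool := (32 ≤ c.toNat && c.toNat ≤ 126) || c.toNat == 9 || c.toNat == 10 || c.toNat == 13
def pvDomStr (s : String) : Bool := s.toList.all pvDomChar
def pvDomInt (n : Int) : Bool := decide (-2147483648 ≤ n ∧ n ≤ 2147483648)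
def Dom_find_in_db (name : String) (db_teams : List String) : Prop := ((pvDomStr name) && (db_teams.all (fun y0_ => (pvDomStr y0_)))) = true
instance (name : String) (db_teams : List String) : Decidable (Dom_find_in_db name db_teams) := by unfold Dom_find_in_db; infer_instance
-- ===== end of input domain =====

-- B replaces A's three scans by one exact-membership check plus a single loop keeping two
-- first-match slots (normalized-equal before substring); objective: simpler.

-- ===== PORT A =====
-- normalize(s) for a str argument: (s or "").strip().lower() = s.strip().lower()
def pvNormalize (s : String) : String := PySem.Str.lower (PySem.Str.strip s)

-- the final 'for st in db_teams' loop of A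
def pvLoopA (n : String) : List String → Option String
  | [] => none
  | st :: rest =>
    if n = pvNormalize st then some st
    else if PySem.Str.isIn n (PySem.Str.lower st) || PySem.Str.isIn (PySem.Str.lower st) n then some st
    else pvLoopA n rest

def find_in_db (name : String) (db_teams : List String) : Option String :=
  if name = "" ∨ db_teams = [] then none
  else
    let n := pvNormalize name
    if name ∈ db_teams then some name
    else
      let db_lower := db_teams.map (fun t => PySem.Str.lower (PySem.Str.strip t))
      if n ∈ db_lower then
        -- db_teams[db_lower.index(n)] : index exists (n ∈ db_lower) and is in range
        match PySem.List.index? db_lower n with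
        | some i => db_teams[i]?
        | none => none
      else pvLoopA n db_teams

-- ===== PORT B =====
-- the single loop of Source B carrying the two slots
def pvLoopB (n : String) (normHit subHit : Option String) : List String → Option String × Option String
  | [] => (normHit, subHit)
  | st :: rest =>
    let sl := PySem.Str.lower st
    let normHit' := if normHit.isNone ∧ PySem.Str.lower (PySem.Str.strip st) = n then some st else normHit
    let subHit' := if subHit.isNone ∧ (PySem.Str.isIn n sl || PySem.Str.isIn sl n) then some st else subHit
    pvLoopB n normHit' subHit' rest

def find_in_db_alt (name : String) (db_teams : List String) : Option String :=
  if name = "" ∨ db_teams = [] then none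
  else if name ∈ db_teams then some name
  else
    let n := pvNormalize name
    let p := pvLoopB n none none db_teams
    match p.1 with
    | some t => some t
    | none => p.2

-- ===== PRECONDITION & SPEC =====
def Spec_find_in_db (name : String) (db_teams : List String) (out : Option String) : Prop := out = find_in_db_alt name db_teams
instance (name : String) (db_teams : List String) (out : Option String) : Decidable (Spec_find_in_db name db_teams out) := by unfold Spec_find_in_db; infer_instance

-- ===== CLAIM (what is proved, stated in full; the proofs are below) =====
def Claim_equal_find_in_db : Prop := ∀ (name : String) (db_teams : List String), Dom_find_in_db name db_teams → Spec_find_in_db name db_teams (find_in_db name db_teams)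

-- ===== LEMMAS AND PROOFS =====

-- the "first normalized match" and "first substring match" as find?
def pvFirstNorm (n : String) (xs : List String) : Option String :=
  xs.find? (fun x => pvNormalize x = n)
def pvFirstSub (n : String) (xs : List String) : Option String :=
  xs.find? (fun x => PySem.Str.isIn n (PySem.Str.lower x) || PySem.Str.isIn (PySem.Str.lower x) n)

-- A's db_teams[db_lower.index(n)] is the first normalized match
theorem pvIndexA (n : String) (xs : List String) :
    (match PySem.List.index? (xs.map (fun t => PySem.Str.lower (PySem.Str.strip t))) n with
      | some i => xs[i]?
      | none => (none : Option String)) = pvFirstNorm n xs := by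
  induction xs with
  | nil => rfl
  | cons x rest ih =>
    rw [List.map_cons]
    by_cases h : PySem.Str.lower (PySem.Str.strip x) = n
    · rw [h, PySem.List.index?_cons_self]
      simp [pvFirstNorm, pvNormalize, h]
    · rw [PySem.List.index?_cons_of_ne _ h]
      have hfn : pvFirstNorm n (x :: rest) = pvFirstNorm n rest := by
        simp only [pvFirstNorm, List.find?_cons, pvNormalize]
        simp [h]
      rw [hfn]
      cases hidx : PySem.List.index? (rest.map (fun t => PySem.Str.lower (PySem.Str.strip t))) n with
      | none => rw [hidx] at ih; simpa using ih
      | some i => rw [hidx] at ih; simpa using ih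

-- when no normalized match exists, the 'n == normalize(st)' branch never fires:
-- A's loop returns the first substring match
theorem pvLoopA_eq (n : String) (xs : List String)
    (h : n ∉ xs.map (fun t => PySem.Str.lower (PySem.Str.strip t))) :
    pvLoopA n xs = pvFirstSub n xs := by
  induction xs with
  | nil => rfl
  | cons x rest ih =>
    simp only [List.map_cons, List.mem_cons, not_or] at h
    have hx : n ≠ pvNormalize x := by simpa [pvNormalize] using h.1
    rw [pvLoopA, if_neg hx]
    cases hb : (PySem.Str.isIn n (PySem.Str.lower x) || PySem.Str.isIn (PySem.Str.lower x) n) with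
    | true =>
      rw [if_pos rfl]
      simp only [pvFirstSub, List.find?_cons, hb]
    | false =>
      rw [if_neg (by simp), ih h.2]
      simp only [pvFirstSub, List.find?_cons, hb]

-- the two slots of B's loop: first normalized match and first substring match
theorem pvLoopB_eq (n : String) (xs : List String) : ∀ nh sh : Option String,
    pvLoopB n nh sh xs = (nh.or (pvFirstNorm n xs), sh.or (pvFirstSub n xs)) := by
  induction xs with
  | nil => intro nh sh; simp [pvLoopB, pvFirstNorm, pvFirstSub]
  | cons x rest ih =>
    intro nh sh
    rw [pvLoopB, ih]
    refine Prod.ext ?_ ?_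
    · cases nh with
      | some a => simp
      | none =>
        simp only [Option.isNone_none, Option.none_or]
        by_cases hnx : PySem.Str.lower (PySem.Str.strip x) = n
        · rw [if_pos (by simp [hnx])]
          simp only [pvFirstNorm, List.find?_cons, pvNormalize]
          simp [hnx]
        · rw [if_neg (by simp [hnx])]
          simp only [Option.none_or, pvFirstNorm, List.find?_cons, pvNormalize]
          simp [hnx]
    · cases sh with
      | some a => simp
      | none =>
        simp only [Option.isNone_none, Option.none_or]
        cases hb : (PySem.Str.isIn n (PySem.Str.lower x) || PySem.Str.isIn (PySem.Str.lower x) n) with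
        | true =>
          rw [if_pos (by simp)]
          simp only [pvFirstSub, List.find?_cons, hb]
          rfl
        | false =>
          rw [if_neg (by simp)]
          simp only [Option.none_or, pvFirstSub, List.find?_cons, hb]

-- n ∈ db_lower ↔ pvFirstNorm is some
theorem pvMemNorm (n : String) (xs : List String) :
    n ∈ xs.map (fun t => PySem.Str.lower (PySem.Str.strip t)) ↔ (pvFirstNorm n xs).isSome := by
  rw [pvFirstNorm, List.find?_isSome]
  simp [pvNormalize, eq_comm]

-- ===== VERDICT (by name: the statement is the Claim_ definition above) =====
theorem find_in_db_spec : Claim_equal_find_in_db := by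
  intro name db_teams _
  unfold Spec_find_in_db find_in_db find_in_db_alt
  by_cases h0 : name = "" ∨ db_teams = []
  · simp only [if_pos h0]
  · simp only [if_neg h0]
    by_cases hm : name ∈ db_teams
    · simp only [if_pos hm]
    · simp only [if_neg hm]
      rw [pvLoopB_eq]
      simp only [Option.none_or]
      by_cases hn : pvNormalize name ∈ db_teams.map (fun t => PySem.Str.lower (PySem.Str.strip t))
      · rw [if_pos hn]
        have hs := (pvMemNorm (pvNormalize name) db_teams).mp hn
        cases hfn : pvFirstNorm (pvNormalize name) db_teams with
        | none => rw [hfn] at hs; exact absurd hs (by simp)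
        | some t =>
          have hA := pvIndexA (pvNormalize name) db_teams
          rw [hfn] at hA
          rw [hA]
      · rw [if_neg hn, pvLoopA_eq _ _ hn]
        have hs : pvFirstNorm (pvNormalize name) db_teams = none := by
          cases hfn : pvFirstNorm (pvNormalize name) db_teams with
          | none => rfl
          | some t => exact absurd ((pvMemNorm _ _).mpr (by rw [hfn]; rfl)) hn
        rw [hs]
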